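-- pv_equiv track=rewrite | github.com/josedata6/SmartCartPro | SmartCartProject.py | recommendProduct
-- ===== SOURCE A (Python) =====
-- def recommendProduct(catalog, cart, index=0):  # checks if the index is provided
--     if index >= len(catalog): # checks if the index is out of range
--         return "No recommendation available."
--     product = catalog[index][0] # gets the product name
--     for item in cart:
--         if item["product"] == product: # checks if the product is in the cart
--             return recommendProduct(catalog, cart, index + 1) # recursively calls the function with the next index
--     return product
-- ===== SOURCE B (Python) =====
-- def recommendProduct(catalog, cart, index=0):
--     for entry in catalog[index:]:
--         if not any(item["product"] == entry[0] for item in cart):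
--             return entry[0]
--     return "No recommendation available."
-- ===== Notes on version B (the rewrite author's own statement) =====
-- stated objective: simpler
-- what changed: Replaced the tail recursion over an index by a single flat loop over the catalog slice catalog[index:], with the cart scan as a short-circuiting any() generator.
-- outside the precondition, e.g. on recommendProduct([['a'], ['b']], [{'product': 'b'}], -1): A returns 'a', B returns 'No recommendation available.'; on recommendProduct([['a'], []], [], 0): A returns 'a', B returns 'a'
import Mathlib
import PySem

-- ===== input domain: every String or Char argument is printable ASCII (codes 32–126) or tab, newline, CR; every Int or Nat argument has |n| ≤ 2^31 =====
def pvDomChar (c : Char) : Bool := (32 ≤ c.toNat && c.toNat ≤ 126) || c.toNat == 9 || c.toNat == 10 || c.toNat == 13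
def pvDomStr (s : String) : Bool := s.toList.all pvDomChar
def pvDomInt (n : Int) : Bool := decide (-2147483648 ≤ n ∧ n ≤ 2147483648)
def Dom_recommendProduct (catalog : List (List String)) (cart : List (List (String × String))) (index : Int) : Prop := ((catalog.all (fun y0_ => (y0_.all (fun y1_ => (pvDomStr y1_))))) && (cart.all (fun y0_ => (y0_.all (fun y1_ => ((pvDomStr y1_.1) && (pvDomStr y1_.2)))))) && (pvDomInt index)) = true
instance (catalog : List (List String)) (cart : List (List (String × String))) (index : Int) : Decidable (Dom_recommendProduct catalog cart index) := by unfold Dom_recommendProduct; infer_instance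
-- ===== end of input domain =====

-- B replaces A's tail recursion over an index by one flat loop over the catalog
-- slice catalog[index:], the cart scan becoming a short-circuiting any() (objective: simpler).

-- ===== PORT A =====
-- Literal port of A's tail recursion; dict lookup item["product"] is a first-match
-- association-list lookup, defaulted to "" only where Pre_ rules out the KeyError/IndexError.
def recommendProduct (catalog : List (List String)) (cart : List (List (String × String))) (index : Int) : String :=
  if h : (catalog.length : Int) ≤ index then "No recommendation available."
  else
    let row := (PySem.List.pyGet? catalog index).getD []
    let product := (PySem.List.pyGet? row 0).getD ""
    if cart.any (fun item => ((item.lookup "product").getD "") == product) then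
      recommendProduct catalog cart (index + 1)
    else product
termination_by ((catalog.length : Int) + 1 - index).toNat
decreasing_by omega

-- ===== PORT B =====
-- the flat 'for entry in catalog[index:]' loop of Source B; 'any(item["product"] == entry[0] for item in cart)' is List.any
def pvScanCatalog (cart : List (List (String × String))) : List (List String) → String
  | [] => "No recommendation available."
  | entry :: rest =>
    let p := (PySem.List.pyGet? entry 0).getD ""
    if cart.any (fun item => ((item.lookup "product").getD "") == p) then pvScanCatalog cart rest else p

def recommendProduct_alt (catalog : List (List String)) (cart : List (List (String × String))) (index : Int) : String :=
  pvScanCatalog cart (PySem.List.slice catalog (some index) none)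

-- ===== PRECONDITION & SPEC =====
-- Pre_ excludes negative index (outside the natural domain; A's negative-index wraparound
-- restarts the recursion at 0, which is accidental) and, when the index is in range,
-- catalog rows at or after it that are empty (IndexError when reached) and cart items
-- without a "product" key (KeyError when scanned); on a few such inputs A still returns
-- because the bad row/item is never reached — see the cites in the claim.
def Pre_recommendProduct (catalog : List (List String)) (cart : List (List (String × String))) (index : Int) : Prop :=
  0 ≤ index ∧ ((catalog.length : Int) ≤ index ∨
    ((∀ row ∈ catalog.drop index.toNat, row ≠ []) ∧ ∀ item ∈ cart, (item.lookup "product").isSome))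
instance (catalog : List (List String)) (cart : List (List (String × String))) (index : Int) : Decidable (Pre_recommendProduct catalog cart index) := by unfold Pre_recommendProduct; infer_instance

def pvWitness_recommendProduct : List (List String) × (List (List (String × String))) × Int :=
  ([["apple", "1"], ["pear"]], [[("product", "apple")]], 0)

def Spec_recommendProduct (catalog : List (List String)) (cart : List (List (String × String))) (index : Int) (out : String) : Prop := out = recommendProduct_alt catalog cart index
instance (catalog : List (List String)) (cart : List (List (String × String))) (index : Int) (out : String) : Decidable (Spec_recommendProduct catalog cart index out) := by unfold Spec_recommendProduct; infer_instance

-- ===== CLAIM (what is proved, stated in full; the proofs are below) =====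
def Claim_equal_recommendProduct : Prop := ∀ (catalog : List (List String)) (cart : List (List (String × String))) (index : Int), Dom_recommendProduct catalog cart index → Pre_recommendProduct catalog cart index → Spec_recommendProduct catalog cart index (recommendProduct catalog cart index)

-- ===== LEMMAS AND PROOFS =====

lemma pv_main (catalog : List (List String)) (cart : List (List (String × String))) :
    ∀ (n : Nat) (index : Int), 0 ≤ index → catalog.length ≤ index.toNat + n →
      recommendProduct catalog cart index = pvScanCatalog cart (catalog.drop index.toNat) := by
  intro n
  induction n with
  | zero =>
    intro index h0 hn
    rw [recommendProduct, List.drop_eq_nil_of_le (by omega)]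
    have hlen : (catalog.length : Int) ≤ index := by omega
    simp [hlen, pvScanCatalog]
  | succ n ih =>
    intro index h0 hn
    by_cases hlen : (catalog.length : Int) ≤ index
    · rw [recommendProduct, List.drop_eq_nil_of_le (by omega)]
      simp [hlen, pvScanCatalog]
    · have hidx : index.toNat < catalog.length := by omega
      rw [recommendProduct]
      rw [List.drop_eq_getElem_cons hidx]
      simp only [hlen, dif_neg, not_false_iff]
      rw [PySem.List.pyGet?_of_nonneg _ h0]
      rw [List.getElem?_eq_getElem hidx]
      rw [pvScanCatalog]
      simp only [Option.getD_some]
      split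
      · have h1 : (index + 1).toNat = index.toNat + 1 := by omega
        rw [ih (index + 1) (by omega) (by omega), h1]
      · rfl

-- ===== VERDICT (by name: the statement is the Claim_ definition above) =====
theorem recommendProduct_spec : Claim_equal_recommendProduct := by
  intro catalog cart index _ hpre
  obtain ⟨h0, -⟩ := hpre
  unfold Spec_recommendProduct recommendProduct_alt
  rw [PySem.List.slice_from _ h0]
  exact pv_main catalog cart catalog.length index h0 (by omega)
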